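-- pv_equiv track=rewrite | github.com/youngwoo2020/Rerec | 5.data_filtering.py | id_map
-- ===== SOURCE A (Python) =====
-- def id_map(user_items, user_ratings, user_titles, user_reviews):
--     user2id, item2id, id2user, id2item = {}, {}, {}, {}
--     user_id, item_id = 1, 1
--     final_data = {}
--     final_rating = {} if user_ratings is not None else None
--     final_title  = {} if user_titles  is not None else None
--     final_review = {} if user_reviews  is not None else None
--
--     for user, items in user_items.items():
--         if user not in user2id:
--             user2id[user] = str(user_id)
--             id2user[str(user_id)] = user
--             user_id += 1
--
--         iids  = []
--         rlist = [] if user_ratings is not None else None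
--         tlist = [] if user_titles  is not None else None
--         relist = [] if user_reviews is not None else None
--
--         ratings_for_user = user_ratings.get(user, []) if user_ratings is not None else None
--         titles_for_user  = user_titles.get(user, [])  if user_titles  is not None else None
--         reviews_for_user = user_reviews.get(user, [])  if user_reviews  is not None else None
--
--         for idx, item in enumerate(items):
--             if item not in item2id:
--                 item2id[item] = str(item_id)
--                 id2item[str(item_id)] = item
--                 item_id += 1
--             iids.append(item2id[item])
--
--             if rlist is not None:
--                 r = ratings_for_user[idx] if idx < len(ratings_for_user) else None
--                 rlist.append(r)
--
--             if tlist is not None: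
--                 t = titles_for_user[idx] if idx < len(titles_for_user) else None
--                 tlist.append(t)
--
--             if relist is not None:
--                 re = reviews_for_user[idx] if idx < len(reviews_for_user) else None
--                 relist.append(re)
--
--         uid = user2id[user]
--         final_data[uid] = iids
--         if final_rating is not None:
--             final_rating[uid] = rlist
--
--         if final_title is not None:
--             final_title[uid] = tlist
--
--         if final_review is not None:
--             final_review[uid] = relist
--
--     data_maps = {"user2id": user2id, "item2id": item2id, "id2user": id2user, "id2item": id2item}
--     return final_data, final_rating, final_title,final_review, (user_id - 1), (item_id - 1), data_maps
-- ===== SOURCE B (Python) =====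
-- def id_map(user_items, user_ratings, user_titles, user_reviews):
--     # Pass 1: assign ids in encounter order.
--     user2id, id2user, item2id, id2item = {}, {}, {}, {}
--     for user, items in user_items.items():
--         if user not in user2id:
--             uid = str(len(user2id) + 1)
--             user2id[user] = uid
--             id2user[uid] = user
--         for item in items:
--             if item not in item2id:
--                 iid = str(len(item2id) + 1)
--                 item2id[item] = iid
--                 id2item[iid] = item
--
--     # Pass 2: assemble the outputs from the finished maps.
--     def pad(source):
--         return {
--             user2id[user]: [source.get(user, [])[i] if i < len(source.get(user, [])) else None
--                             for i in range(len(items))]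
--             for user, items in user_items.items()
--         }
--
--     final_data = {user2id[u]: [item2id[it] for it in items]
--                   for u, items in user_items.items()}
--     final_rating = pad(user_ratings) if user_ratings is not None else None
--     final_title = pad(user_titles) if user_titles is not None else None
--     final_review = pad(user_reviews) if user_reviews is not None else None
--     data_maps = {"user2id": user2id, "item2id": item2id,
--                  "id2user": id2user, "id2item": id2item}
--     return (final_data, final_rating, final_title, final_review,
--             len(user2id), len(item2id), data_maps)
-- ===== Notes on version B (the rewrite author's own statement) =====
-- stated objective: simpler
-- what changed: B splits A's single interleaved loop into two phases: one pass that only assigns user/item ids in encounter order, then dict comprehensions that assemble final_data and the padded rating/title/review dicts from the finished maps (counters replaced by map sizes).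
import Mathlib
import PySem

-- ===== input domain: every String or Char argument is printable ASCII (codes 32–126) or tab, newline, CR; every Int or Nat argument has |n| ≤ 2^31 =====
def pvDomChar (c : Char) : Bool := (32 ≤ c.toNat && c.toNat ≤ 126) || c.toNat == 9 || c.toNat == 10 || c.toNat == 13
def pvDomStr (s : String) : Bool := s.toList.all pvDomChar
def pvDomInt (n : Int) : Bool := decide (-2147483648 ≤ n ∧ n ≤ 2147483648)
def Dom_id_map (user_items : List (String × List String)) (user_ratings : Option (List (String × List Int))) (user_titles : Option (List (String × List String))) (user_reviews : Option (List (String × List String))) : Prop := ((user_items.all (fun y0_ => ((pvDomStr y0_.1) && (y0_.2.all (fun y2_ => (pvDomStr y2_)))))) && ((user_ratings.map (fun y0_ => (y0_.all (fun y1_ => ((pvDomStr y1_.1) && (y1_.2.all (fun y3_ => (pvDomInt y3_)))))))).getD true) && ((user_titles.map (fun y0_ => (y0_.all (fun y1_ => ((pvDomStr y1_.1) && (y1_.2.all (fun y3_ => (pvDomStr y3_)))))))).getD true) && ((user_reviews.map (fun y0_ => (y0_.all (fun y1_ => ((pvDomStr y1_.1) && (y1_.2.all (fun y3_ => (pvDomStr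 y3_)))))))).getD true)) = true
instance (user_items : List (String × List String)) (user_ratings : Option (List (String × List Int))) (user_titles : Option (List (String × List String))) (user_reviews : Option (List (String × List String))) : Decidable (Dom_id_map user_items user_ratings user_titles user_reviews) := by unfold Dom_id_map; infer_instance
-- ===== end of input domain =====

-- B replaces A's single interleaved loop by two phases (id assignment, then assembly from the
-- finished maps) and the running counters by map sizes; same cost, simpler decomposition.

-- ===== PORT A =====
-- Inner-loop state of A: (item2id, id2item, item_id, idx, iids, rlist, tlist, relist)
structure AInnerSt where
  i2i : PySem.Dict String String
  idItem : PySem.Dict String String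
  itemId : Int
  idx : Nat           -- Python's enumerate index, always ≥ 0
  iids : List String
  rl : Option (List (Option Int))
  tl : Option (List (Option String))
  rel : Option (List (Option String))
  deriving Repr

-- Outer-loop state of A
structure ASt where
  u2i : PySem.Dict String String
  i2i : PySem.Dict String String
  idUser : PySem.Dict String String
  idItem : PySem.Dict String String
  userId : Int
  itemId : Int
  fd : PySem.Dict String (List String)
  fr : Option (PySem.Dict String (List (Option Int)))
  ft : Option (PySem.Dict String (List (Option String)))
  fre : Option (PySem.Dict String (List (Option String)))
  deriving Repr

-- body of A's 'for idx, item in enumerate(items)'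
def aItemStep (rats : Option (List Int)) (tits revs : Option (List String))
    (s : AInnerSt) (item : String) : AInnerSt :=
  let s1 := if s.i2i.contains item then s
    else { s with i2i := s.i2i.insert item (PySem.Int.toStr s.itemId),
                  idItem := s.idItem.insert (PySem.Int.toStr s.itemId) item,
                  itemId := s.itemId + 1 }
  { s1 with
    iids := s1.iids ++ [s1.i2i.getD item ""],  -- item2id[item]; key was just ensured present, "" unreachable
    -- 'if rlist is not None: r = ratings_for_user[idx] if idx < len(...) else None'
    -- (rlist non-None forces ratings_for_user to be a list in A; the 'none' arm is unreachable)
    rl := s1.rl.map (fun l => l ++ [match rats with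
            | some rs => if s1.idx < rs.length then rs[s1.idx]? else none
            | none => none]),
    tl := s1.tl.map (fun l => l ++ [match tits with
            | some ts => if s1.idx < ts.length then ts[s1.idx]? else none
            | none => none]),
    rel := s1.rel.map (fun l => l ++ [match revs with
            | some vs => if s1.idx < vs.length then vs[s1.idx]? else none
            | none => none]),
    idx := s1.idx + 1 }

-- body of A's 'for user, items in user_items.items()'
def aUserStep (ur : Option (List (String × List Int))) (ut urev : Option (List (String × List String)))
    (st : ASt) (p : String × List String) : ASt :=
  let st1 := if st.u2i.contains p.1 then st
    else { st with u2i := st.u2i.insert p.1 (PySem.Int.toStr st.userId),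
                   idUser := st.idUser.insert (PySem.Int.toStr st.userId) p.1,
                   userId := st.userId + 1 }
  let rats := ur.map (fun src => (PySem.Dict.mk src).getD p.1 [])
  let tits := ut.map (fun src => (PySem.Dict.mk src).getD p.1 [])
  let revs := urev.map (fun src => (PySem.Dict.mk src).getD p.1 [])
  let fin := p.2.foldl (aItemStep rats tits revs)
      ⟨st1.i2i, st1.idItem, st1.itemId, 0, [],
       ur.map (fun _ => []), ut.map (fun _ => []), urev.map (fun _ => [])⟩
  let uid := st1.u2i.getD p.1 ""   -- user2id[user]; present, "" unreachable
  { st1 with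
    i2i := fin.i2i, idItem := fin.idItem, itemId := fin.itemId,
    fd := st1.fd.insert uid fin.iids,
    fr := match st1.fr, fin.rl with | some d, some l => some (d.insert uid l) | a, _ => a,
    ft := match st1.ft, fin.tl with | some d, some l => some (d.insert uid l) | a, _ => a,
    fre := match st1.fre, fin.rel with | some d, some l => some (d.insert uid l) | a, _ => a }

def id_map (user_items : List (String × List String)) (user_ratings : Option (List (String × List Int))) (user_titles : Option (List (String × List String))) (user_reviews : Option (List (String × List String))) : (List (String × List String)) × (Option (List (String × List (Option Int)))) × (Option (List (String × List (Option String)))) × (Option (List (String × List (Option String)))) × Int × Int × (List (String × List (String × String))) :=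
  let st := user_items.foldl (aUserStep user_ratings user_titles user_reviews)
    ⟨PySem.Dict.empty, PySem.Dict.empty, PySem.Dict.empty, PySem.Dict.empty, 1, 1, PySem.Dict.empty,
     user_ratings.map (fun _ => PySem.Dict.empty),
     user_titles.map (fun _ => PySem.Dict.empty),
     user_reviews.map (fun _ => PySem.Dict.empty)⟩
  (st.fd.items, st.fr.map (·.items), st.ft.map (·.items), st.fre.map (·.items),
   st.userId - 1, st.itemId - 1,
   [("user2id", st.u2i.items), ("item2id", st.i2i.items),
    ("id2user", st.idUser.items), ("id2item", st.idItem.items)])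

-- ===== PORT B =====
structure BMaps where
  u2i : PySem.Dict String String
  i2u : PySem.Dict String String
  i2i : PySem.Dict String String
  i2it : PySem.Dict String String
  deriving Repr

-- 'if item not in item2id: ...' of B's pass 1 (pair = (item2id, id2item))
def bItemAdd (P : PySem.Dict String String × PySem.Dict String String) (item : String) :
    PySem.Dict String String × PySem.Dict String String :=
  if P.1.contains item then P
  else
    let iid := PySem.Int.toStr ((P.1.size : Int) + 1)
    (P.1.insert item iid, P.2.insert iid item)

-- one user of B's pass 1
def bUserAdd (m : BMaps) (p : String × List String) : BMaps :=
  let m1 := if m.u2i.contains p.1 then m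
    else
      let uid := PySem.Int.toStr ((m.u2i.size : Int) + 1)
      { m with u2i := m.u2i.insert p.1 uid, i2u := m.i2u.insert uid p.1 }
  let P := p.2.foldl bItemAdd (m1.i2i, m1.i2it)
  { m1 with i2i := P.1, i2it := P.2 }

-- B's 'pad' dict comprehension
def bPad {α : Type} (u2i : PySem.Dict String String) (user_items : List (String × List String))
    (src : List (String × List α)) : PySem.Dict String (List (Option α)) :=
  user_items.foldl (fun d p =>
    let row := (PySem.Dict.mk src).getD p.1 []
    d.insert (u2i.getD p.1 "")
      ((List.range p.2.length).map (fun i => if i < row.length then row[i]? else none)))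
    PySem.Dict.empty

def id_map_alt (user_items : List (String × List String)) (user_ratings : Option (List (String × List Int))) (user_titles : Option (List (String × List String))) (user_reviews : Option (List (String × List String))) : (List (String × List String)) × (Option (List (String × List (Option Int)))) × (Option (List (String × List (Option String)))) × (Option (List (String × List (Option String)))) × Int × Int × (List (String × List (String × String))) :=
  let m := user_items.foldl bUserAdd ⟨PySem.Dict.empty, PySem.Dict.empty, PySem.Dict.empty, PySem.Dict.empty⟩
  let fd := user_items.foldl
    (fun d p => d.insert (m.u2i.getD p.1 "") (p.2.map (fun it => m.i2i.getD it ""))) PySem.Dict.empty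
  (fd.items,
   user_ratings.map (fun src => (bPad m.u2i user_items src).items),
   user_titles.map (fun src => (bPad m.u2i user_items src).items),
   user_reviews.map (fun src => (bPad m.u2i user_items src).items),
   (m.u2i.size : Int), (m.i2i.size : Int),
   [("user2id", m.u2i.items), ("item2id", m.i2i.items),
    ("id2user", m.i2u.items), ("id2item", m.i2it.items)])

-- ===== PRECONDITION & SPEC =====
def Spec_id_map (user_items : List (String × List String)) (user_ratings : Option (List (String × List Int))) (user_titles : Option (List (String × List String))) (user_reviews : Option (List (String × List String))) (out : (List (String × List String)) × (Option (List (String × List (Option Int)))) × (Option (List (String × List (Option String)))) × (Option (List (String × List (Option String)))) × Int × Int × (List (String × List (String × String)))) : Prop := out = id_map_alt user_items user_ratings user_titles user_reviews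
instance (user_items : List (String × List String)) (user_ratings : Option (List (String × List Int))) (user_titles : Option (List (String × List String))) (user_reviews : Option (List (String × List String))) (out : (List (String × List String)) × (Option (List (String × List (Option Int)))) × (Option (List (String × List (Option String)))) × (Option (List (String × List (Option String)))) × Int × Int × (List (String × List (String × String)))) : Decidable (Spec_id_map user_items user_ratings user_titles user_reviews out) := by
  unfold Spec_id_map
  have h1 : DecidableEq (List (String × List String)) := inferInstance
  have h2 : DecidableEq (Option (List (String × List (Option Int)))) := inferInstance
  have h3 : DecidableEq (Option (List (String × List (Option String)))) := inferInstance
  have h4 : DecidableEq Int := inferInstance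
  have h5 : DecidableEq (List (String × List (String × String))) := inferInstance
  exact @instDecidableEqProd _ _ h1 (@instDecidableEqProd _ _ h2 (@instDecidableEqProd _ _ h3 (@instDecidableEqProd _ _ h3 (@instDecidableEqProd _ _ h4 (@instDecidableEqProd _ _ h4 h5))))) out (id_map_alt user_items user_ratings user_titles user_reviews)

-- ===== CLAIM (what is proved, stated in full; the proofs are below) =====
def Claim_equal_id_map : Prop := ∀ (user_items : List (String × List String)) (user_ratings : Option (List (String × List Int))) (user_titles : Option (List (String × List String))) (user_reviews : Option (List (String × List String))), Dom_id_map user_items user_ratings user_titles user_reviews → Spec_id_map user_items user_ratings user_titles user_reviews (id_map user_items user_ratings user_titles user_reviews)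

-- ===== LEMMAS AND PROOFS =====

-- d' extends d: every existing binding is preserved
def DExt (d d' : PySem.Dict String String) : Prop :=
  ∀ k v, d.get? k = some v → d'.get? k = some v

theorem dext_refl (d : PySem.Dict String String) : DExt d d := fun _ _ h => h

theorem dext_contains {d d' : PySem.Dict String String} (h : DExt d d') {k : String}
    (hc : d.contains k = true) : d'.contains k = true := by
  rw [PySem.Dict.contains_eq_isSome_get?] at hc ⊢
  cases hg : d.get? k with
  | none => simp [hg] at hc
  | some v => simp [h k v hg]

theorem dext_getD {d d' : PySem.Dict String String} (h : DExt d d') {k : String}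
    (hc : d.contains k = true) (x : String) : d'.getD k x = d.getD k x := by
  rw [PySem.Dict.contains_eq_isSome_get?] at hc
  cases hg : d.get? k with
  | none => simp [hg] at hc
  | some v =>
    rw [PySem.Dict.getD_eq_get?_getD, PySem.Dict.getD_eq_get?_getD, hg, h k v hg]

theorem dext_insert_fresh (d : PySem.Dict String String) {k : String} (v : String)
    (hk : d.contains k = false) : DExt d (d.insert k v) := by
  intro k' v' hg
  have hne : k' ≠ k := by
    intro he; subst he
    rw [PySem.Dict.contains_eq_isSome_get?, hg] at hk; simp at hk
  rw [PySem.Dict.get?_insert_of_ne d v hne]; exact hg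

theorem dext_bItemAdd (P : PySem.Dict String String × PySem.Dict String String) (it : String) :
    DExt P.1 (bItemAdd P it).1 := by
  unfold bItemAdd
  by_cases h : P.1.contains it = true
  · simp [h]; exact dext_refl _
  · simp only [Bool.not_eq_true] at h
    simp [h]
    exact dext_insert_fresh _ _ h

theorem dext_foldl_bItemAdd (l : List String) (P : PySem.Dict String String × PySem.Dict String String) :
    DExt P.1 (l.foldl bItemAdd P).1 := by
  induction l generalizing P with
  | nil => exact dext_refl _
  | cons x xs ih =>
    intro k v h
    exact ih (bItemAdd P x) k v (dext_bItemAdd P x k v h)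

theorem contains_bItemAdd_self (P : PySem.Dict String String × PySem.Dict String String) (it : String) :
    (bItemAdd P it).1.contains it = true := by
  unfold bItemAdd
  by_cases h : P.1.contains it = true
  · simp [h]
  · simp only [Bool.not_eq_true] at h
    simp [h, PySem.Dict.contains_insert_self]

theorem contains_foldl_bItemAdd (l : List String) (P : PySem.Dict String String × PySem.Dict String String)
    {it : String} (h : it ∈ l) : (l.foldl bItemAdd P).1.contains it = true := by
  induction l generalizing P with
  | nil => cases h
  | cons x xs ih =>
    rcases List.mem_cons.mp h with h | h
    · subst h
      exact dext_contains (dext_foldl_bItemAdd xs (bItemAdd P it)) (contains_bItemAdd_self P it)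
    · exact ih (bItemAdd P x) h

theorem dext_bUserAdd_u2i (m : BMaps) (p : String × List String) :
    DExt m.u2i (bUserAdd m p).u2i := by
  unfold bUserAdd
  by_cases h : m.u2i.contains p.1 = true
  · simp [h]; exact dext_refl _
  · simp only [Bool.not_eq_true] at h
    simp [h]
    exact dext_insert_fresh _ _ h

theorem dext_bUserAdd_i2i (m : BMaps) (p : String × List String) :
    DExt m.i2i (bUserAdd m p).i2i := by
  unfold bUserAdd
  by_cases h : m.u2i.contains p.1 = true
  · simp [h]; exact dext_foldl_bItemAdd p.2 (m.i2i, m.i2it)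
  · simp only [Bool.not_eq_true] at h
    simp [h]
    exact dext_foldl_bItemAdd p.2 (m.i2i, m.i2it)

theorem dext_foldl_bUserAdd_u2i (r : List (String × List String)) (m : BMaps) :
    DExt m.u2i (r.foldl bUserAdd m).u2i := by
  induction r generalizing m with
  | nil => exact dext_refl _
  | cons x xs ih =>
    intro k v h
    exact ih (bUserAdd m x) k v (dext_bUserAdd_u2i m x k v h)

theorem dext_foldl_bUserAdd_i2i (r : List (String × List String)) (m : BMaps) :
    DExt m.i2i (r.foldl bUserAdd m).i2i := by
  induction r generalizing m with
  | nil => exact dext_refl _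
  | cons x xs ih =>
    intro k v h
    exact ih (bUserAdd m x) k v (dext_bUserAdd_i2i m x k v h)

theorem contains_bUserAdd_self (m : BMaps) (p : String × List String) :
    (bUserAdd m p).u2i.contains p.1 = true := by
  unfold bUserAdd
  by_cases h : m.u2i.contains p.1 = true
  · simp [h]
  · simp only [Bool.not_eq_true] at h
    simp [h, PySem.Dict.contains_insert_self]

-- characterisation of A's inner loop by B's pass-1 step and the assembled lists
theorem inner_char (rats : Option (List Int)) (tits revs : Option (List String)) :
    ∀ (items : List String) (i2i i2it : PySem.Dict String String) (idx : Nat)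
      (iids : List String) (rl : Option (List (Option Int))) (tl rel : Option (List (Option String))),
    items.foldl (aItemStep rats tits revs) ⟨i2i, i2it, (i2i.size : Int) + 1, idx, iids, rl, tl, rel⟩ =
      ⟨(items.foldl bItemAdd (i2i, i2it)).1, (items.foldl bItemAdd (i2i, i2it)).2,
       ((items.foldl bItemAdd (i2i, i2it)).1.size : Int) + 1, idx + items.length,
       iids ++ items.map (fun it => (items.foldl bItemAdd (i2i, i2it)).1.getD it ""),
       rl.map (fun l => l ++ (List.range' idx items.length).map (fun i => match rats with
         | some rs => if i < rs.length then rs[i]? else none | none => none)),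
       tl.map (fun l => l ++ (List.range' idx items.length).map (fun i => match tits with
         | some ts => if i < ts.length then ts[i]? else none | none => none)),
       rel.map (fun l => l ++ (List.range' idx items.length).map (fun i => match revs with
         | some vs => if i < vs.length then vs[i]? else none | none => none))⟩ := by
  intro items
  induction items with
  | nil =>
    intro i2i i2it idx iids rl tl rel
    simp
  | cons it rest ih =>
    intro i2i i2it idx iids rl tl rel
    simp only [List.foldl_cons]
    have hstep : aItemStep rats tits revs ⟨i2i, i2it, (i2i.size : Int) + 1, idx, iids, rl, tl, rel⟩ it =
        ⟨(bItemAdd (i2i, i2it) it).1, (bItemAdd (i2i, i2it) it).2,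
         ((bItemAdd (i2i, i2it) it).1.size : Int) + 1, idx + 1,
         iids ++ [(bItemAdd (i2i, i2it) it).1.getD it ""],
         rl.map (fun l => l ++ [match rats with
           | some rs => if idx < rs.length then rs[idx]? else none | none => none]),
         tl.map (fun l => l ++ [match tits with
           | some ts => if idx < ts.length then ts[idx]? else none | none => none]),
         rel.map (fun l => l ++ [match revs with
           | some vs => if idx < vs.length then vs[idx]? else none | none => none])⟩ := by
      unfold aItemStep bItemAdd
      by_cases h : i2i.contains it = true
      · simp [h]
      · simp only [Bool.not_eq_true] at h
        simp [h, PySem.Dict.size_insert]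
    rw [hstep, ih]
    have hgetD : (bItemAdd (i2i, i2it) it).1.getD it "" =
        (rest.foldl bItemAdd (bItemAdd (i2i, i2it) it)).1.getD it "" := by
      exact (dext_getD (dext_foldl_bItemAdd rest (bItemAdd (i2i, i2it) it))
        (contains_bItemAdd_self (i2i, i2it) it) "").symm
    rw [hgetD]
    simp only [List.range'_succ, Option.map_map, List.map_cons, List.length_cons,
      List.append_assoc, List.singleton_append, AInnerSt.mk.injEq]
    and_intros <;>
      first
        | trivial
        | omega
        | (congr 1; funext l; simp [Function.comp])

theorem contains_bUserAdd_item (m : BMaps) (p : String × List String) {it : String}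
    (h : it ∈ p.2) : (bUserAdd m p).i2i.contains it = true := by
  unfold bUserAdd
  by_cases hc : m.u2i.contains p.1 = true <;>
    simp only [hc, Bool.false_eq_true, if_true, if_false] <;>
      exact contains_foldl_bItemAdd _ _ h

-- characterisation of A's outer loop by B's two phases
theorem outer_char (ur : Option (List (String × List Int))) (ut urev : Option (List (String × List String))) :
    ∀ (r : List (String × List String)) (st : ASt)
      (hu : st.userId = (st.u2i.size : Int) + 1) (hi : st.itemId = (st.i2i.size : Int) + 1),
    r.foldl (aUserStep ur ut urev) st =
      (let M := r.foldl bUserAdd ⟨st.u2i, st.idUser, st.i2i, st.idItem⟩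
       { u2i := M.u2i, i2i := M.i2i, idUser := M.i2u, idItem := M.i2it,
         userId := (M.u2i.size : Int) + 1, itemId := (M.i2i.size : Int) + 1,
         fd := r.foldl (fun d p => d.insert (M.u2i.getD p.1 "")
                 (p.2.map (fun it => M.i2i.getD it ""))) st.fd,
         fr := match ur with
           | none => st.fr
           | some src => st.fr.map (fun d => r.foldl (fun d p =>
               let row := (PySem.Dict.mk src).getD p.1 []
               d.insert (M.u2i.getD p.1 "")
                 ((List.range p.2.length).map (fun i => if i < row.length then row[i]? else none))) d),
         ft := match ut with
           | none => st.ft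
           | some src => st.ft.map (fun d => r.foldl (fun d p =>
               let row := (PySem.Dict.mk src).getD p.1 []
               d.insert (M.u2i.getD p.1 "")
                 ((List.range p.2.length).map (fun i => if i < row.length then row[i]? else none))) d),
         fre := match urev with
           | none => st.fre
           | some src => st.fre.map (fun d => r.foldl (fun d p =>
               let row := (PySem.Dict.mk src).getD p.1 []
               d.insert (M.u2i.getD p.1 "")
                 ((List.range p.2.length).map (fun i => if i < row.length then row[i]? else none))) d)
       } : ASt) := by
  intro r
  induction r with
  | nil =>
    intro st hu hi
    cases ur <;> cases ut <;> cases urev <;>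
      simp [← hu, ← hi, Option.map_id']
  | cons p r' ih =>
    intro st hu hi
    simp only [List.foldl_cons]
    have hstep : aUserStep ur ut urev st p =
      ({ u2i := (bUserAdd ⟨st.u2i, st.idUser, st.i2i, st.idItem⟩ p).u2i,
         i2i := (bUserAdd ⟨st.u2i, st.idUser, st.i2i, st.idItem⟩ p).i2i,
         idUser := (bUserAdd ⟨st.u2i, st.idUser, st.i2i, st.idItem⟩ p).i2u,
         idItem := (bUserAdd ⟨st.u2i, st.idUser, st.i2i, st.idItem⟩ p).i2it,
         userId := ((bUserAdd ⟨st.u2i, st.idUser, st.i2i, st.idItem⟩ p).u2i.size : Int) + 1,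
         itemId := ((bUserAdd ⟨st.u2i, st.idUser, st.i2i, st.idItem⟩ p).i2i.size : Int) + 1,
         fd := st.fd.insert ((bUserAdd ⟨st.u2i, st.idUser, st.i2i, st.idItem⟩ p).u2i.getD p.1 "")
                 (p.2.map (fun it => (bUserAdd ⟨st.u2i, st.idUser, st.i2i, st.idItem⟩ p).i2i.getD it "")),
         fr := match ur with
           | none => st.fr
           | some src => st.fr.map (fun d =>
               let row := (PySem.Dict.mk src).getD p.1 []
               d.insert ((bUserAdd ⟨st.u2i, st.idUser, st.i2i, st.idItem⟩ p).u2i.getD p.1 "")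
                 ((List.range p.2.length).map (fun i => if i < row.length then row[i]? else none))),
         ft := match ut with
           | none => st.ft
           | some src => st.ft.map (fun d =>
               let row := (PySem.Dict.mk src).getD p.1 []
               d.insert ((bUserAdd ⟨st.u2i, st.idUser, st.i2i, st.idItem⟩ p).u2i.getD p.1 "")
                 ((List.range p.2.length).map (fun i => if i < row.length then row[i]? else none))),
         fre := match urev with
           | none => st.fre
           | some src => st.fre.map (fun d =>
               let row := (PySem.Dict.mk src).getD p.1 []
               d.insert ((bUserAdd ⟨st.u2i, st.idUser, st.i2i, st.idItem⟩ p).u2i.getD p.1 "")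
                 ((List.range p.2.length).map (fun i => if i < row.length then row[i]? else none))) } : ASt) := by
      unfold aUserStep bUserAdd
      by_cases hc : st.u2i.contains p.1 = true
      · simp only [hc, if_true, if_pos]
        rw [hi, inner_char]
        rw [List.range_eq_range']
        cases ur <;> cases ut <;> cases urev <;>
          cases hfr : st.fr <;> cases hft : st.ft <;> cases hfre : st.fre <;>
            simp [hfr, hft, hfre, hu, hc]
      · simp only [Bool.not_eq_true] at hc
        simp only [hc, Bool.false_eq_true, if_false]
        rw [hi, inner_char]
        rw [List.range_eq_range']
        rw [hu]
        cases ur <;> cases ut <;> cases urev <;>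
          cases hfr : st.fr <;> cases hft : st.ft <;> cases hfre : st.fre <;>
            (simp [hfr, hft, hfre, PySem.Dict.size_insert, hc, hu])
    rw [hstep, ih _ rfl rfl]
    have heta : (⟨(bUserAdd ⟨st.u2i, st.idUser, st.i2i, st.idItem⟩ p).u2i,
                  (bUserAdd ⟨st.u2i, st.idUser, st.i2i, st.idItem⟩ p).i2u,
                  (bUserAdd ⟨st.u2i, st.idUser, st.i2i, st.idItem⟩ p).i2i,
                  (bUserAdd ⟨st.u2i, st.idUser, st.i2i, st.idItem⟩ p).i2it⟩ : BMaps) =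
        bUserAdd ⟨st.u2i, st.idUser, st.i2i, st.idItem⟩ p := rfl
    rw [heta]
    have hu2 : (r'.foldl bUserAdd (bUserAdd ⟨st.u2i, st.idUser, st.i2i, st.idItem⟩ p)).u2i.getD p.1 "" =
        (bUserAdd ⟨st.u2i, st.idUser, st.i2i, st.idItem⟩ p).u2i.getD p.1 "" :=
      dext_getD (dext_foldl_bUserAdd_u2i r' _) (contains_bUserAdd_self _ p) ""
    have hmap : p.2.map (fun it => (bUserAdd ⟨st.u2i, st.idUser, st.i2i, st.idItem⟩ p).i2i.getD it "") =
        p.2.map (fun it => (r'.foldl bUserAdd (bUserAdd ⟨st.u2i, st.idUser, st.i2i, st.idItem⟩ p)).i2i.getD it "") := by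
      refine List.map_congr_left (fun it h => ?_)
      exact (dext_getD (dext_foldl_bUserAdd_i2i r' _) (contains_bUserAdd_item _ p h) "").symm
    cases ur <;> cases ut <;> cases urev <;>
      simp [hu2, hmap, Option.map_map, Function.comp_def]

-- ===== VERDICT (by name: the statement is the Claim_ definition above) =====
theorem id_map_spec : Claim_equal_id_map := by
  intro ui ur ut urev _
  unfold Spec_id_map _root_.id_map id_map_alt
  rw [outer_char ur ut urev ui _ (by simp) (by simp)]
  cases ur <;> cases ut <;> cases urev <;> simp [bPad]
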